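-- pv_equiv track=rewrite | github.com/lshariprasad/LandmarkDiff-public | scripts/generate_metadata.py | infer_procedure
-- ===== SOURCE A (Python) =====
-- PROCEDURES = [
--     "rhinoplasty",
--     "blepharoplasty",
--     "rhytidectomy",
--     "orthognathic",
--     "brow_lift",
--     "mentoplasty",
-- ]
--
-- def infer_procedure(prefix: str) -> str:
--     """Infer surgical procedure from filename."""
--     prefix_lower = prefix.lower()
--     for proc in PROCEDURES:
--         if proc in prefix_lower:
--             return proc
--         # Handle abbreviations
--         if proc[:5] in prefix_lower:
--             return proc
--
--     # Common patterns
--     if "rhino" in prefix_lower or "nose" in prefix_lower: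
--         return "rhinoplasty"
--     if "bleph" in prefix_lower or "eye" in prefix_lower:
--         return "blepharoplasty"
--     if "rhytid" in prefix_lower or "face" in prefix_lower or "lift" in prefix_lower:
--         return "rhytidectomy"
--     if "ortho" in prefix_lower or "jaw" in prefix_lower:
--         return "orthognathic"
--
--     return "unknown"
-- ===== SOURCE B (Python) =====
-- # Single ordered rule table: first matching substring wins; prefix rules subsume
-- # the full-name checks, fallback patterns appended after.
-- RULES = [
--     ("rhino", "rhinoplasty"),
--     ("bleph", "blepharoplasty"),
--     ("rhyti", "rhytidectomy"),
--     ("ortho", "orthognathic"),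
--     ("brow_", "brow_lift"),
--     ("mento", "mentoplasty"),
--     ("nose", "rhinoplasty"),
--     ("eye", "blepharoplasty"),
--     ("face", "rhytidectomy"),
--     ("lift", "rhytidectomy"),
--     ("jaw", "orthognathic"),
-- ]
--
-- def infer_procedure(prefix: str) -> str:
--     """Infer surgical procedure from filename."""
--     t = prefix.lower()
--     return next((label for sub, label in RULES if sub in t), "unknown")
-- ===== Notes on version B (the rewrite author's own statement) =====
-- stated objective: simpler
-- what changed: Replaced the two-level loop over PROCEDURES (full-name check plus proc[:5] check) followed by an if-chain of fallback patterns with a single ordered (substring, label) rule table scanned once for the first match; the full-name checks are subsumed by their 5-char prefixes.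
import Mathlib
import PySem

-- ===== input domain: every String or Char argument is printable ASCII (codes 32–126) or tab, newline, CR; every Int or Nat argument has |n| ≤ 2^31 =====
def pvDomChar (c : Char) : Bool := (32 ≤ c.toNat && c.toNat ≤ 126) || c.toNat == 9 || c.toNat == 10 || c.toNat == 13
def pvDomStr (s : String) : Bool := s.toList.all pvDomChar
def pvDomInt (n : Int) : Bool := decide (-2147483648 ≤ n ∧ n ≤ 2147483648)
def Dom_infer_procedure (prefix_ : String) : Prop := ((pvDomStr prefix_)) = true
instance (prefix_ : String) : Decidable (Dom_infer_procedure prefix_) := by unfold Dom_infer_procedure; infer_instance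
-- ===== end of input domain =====

-- B replaces A's loop-plus-fallback-if-chain with one ordered rule table scanned once (objective: simpler).

-- ===== PORT A =====
def pvPROCEDURES : List String :=
  ["rhinoplasty", "blepharoplasty", "rhytidectomy", "orthognathic", "brow_lift", "mentoplasty"]

-- the 'for proc in PROCEDURES' loop with its two early returns
def pvALoop (t : String) : List String → Option String
  | [] => none
  | p :: rest =>
      if PySem.Str.isIn p t then some p
      else if PySem.Str.isIn (PySem.Str.slice p none (some 5)) t then some p
      else pvALoop t rest

def infer_procedure (prefix_ : String) : String :=
  let prefix_lower := PySem.Str.lower prefix_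
  match pvALoop prefix_lower pvPROCEDURES with
  | some p => p
  | none =>
      if PySem.Str.isIn "rhino" prefix_lower || PySem.Str.isIn "nose" prefix_lower then "rhinoplasty"
      else if PySem.Str.isIn "bleph" prefix_lower || PySem.Str.isIn "eye" prefix_lower then "blepharoplasty"
      else if PySem.Str.isIn "rhytid" prefix_lower || PySem.Str.isIn "face" prefix_lower || PySem.Str.isIn "lift" prefix_lower then "rhytidectomy"
      else if PySem.Str.isIn "ortho" prefix_lower || PySem.Str.isIn "jaw" prefix_lower then "orthognathic"
      else "unknown"

-- ===== PORT B =====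
def pvRULES : List (String × String) :=
  [("rhino", "rhinoplasty"), ("bleph", "blepharoplasty"), ("rhyti", "rhytidectomy"),
   ("ortho", "orthognathic"), ("brow_", "brow_lift"), ("mento", "mentoplasty"),
   ("nose", "rhinoplasty"), ("eye", "blepharoplasty"), ("face", "rhytidectomy"),
   ("lift", "rhytidectomy"), ("jaw", "orthognathic")]

def infer_procedure_alt (prefix_ : String) : String :=
  let t := PySem.Str.lower prefix_
  match pvRULES.find? (fun r => PySem.Str.isIn r.1 t) with
  | some r => r.2
  | none => "unknown"

-- ===== PRECONDITION & SPEC =====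
def Spec_infer_procedure (prefix_ : String) (out : String) : Prop := out = infer_procedure_alt prefix_
instance (prefix_ : String) (out : String) : Decidable (Spec_infer_procedure prefix_ out) := by unfold Spec_infer_procedure; infer_instance

-- ===== CLAIM (what is proved, stated in full; the proofs are below) =====
def Claim_equal_infer_procedure : Prop := ∀ (prefix_ : String), Dom_infer_procedure prefix_ → Spec_infer_procedure prefix_ (infer_procedure prefix_)

-- ===== LEMMAS AND PROOFS =====

-- if a prefix of sub is absent from t, sub itself is absent from t
theorem pv_isIn_false_of_prefix {sub' sub t : List Char}
    (hp : sub' <+: sub) (h : PySem.Chars.isIn sub' t = false) :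
    PySem.Chars.isIn sub t = false := by
  cases hfull : PySem.Chars.isIn sub t with
  | false => rfl
  | true =>
      rw [PySem.Chars.isIn_iff_infix] at hfull
      rw [PySem.Chars.isIn_eq_false_iff] at h
      exact absurd (hp.isInfix.trans hfull) h

theorem infer_procedure_eq_alt (prefix_ : String) :
    infer_procedure prefix_ = infer_procedure_alt prefix_ := by
  unfold infer_procedure infer_procedure_alt pvPROCEDURES pvRULES
  have s1 : PySem.List.slice ['r', 'h', 'i', 'n', 'o', 'p', 'l', 'a', 's', 't', 'y'] none (some 5) = ['r', 'h', 'i', 'n', 'o'] := by decide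
  have s2 : PySem.List.slice ['b', 'l', 'e', 'p', 'h', 'a', 'r', 'o', 'p', 'l', 'a', 's', 't', 'y'] none (some 5) = ['b', 'l', 'e', 'p', 'h'] := by decide
  have s3 : PySem.List.slice ['r', 'h', 'y', 't', 'i', 'd', 'e', 'c', 't', 'o', 'm', 'y'] none (some 5) = ['r', 'h', 'y', 't', 'i'] := by decide
  have s4 : PySem.List.slice ['o', 'r', 't', 'h', 'o', 'g', 'n', 'a', 't', 'h', 'i', 'c'] none (some 5) = ['o', 'r', 't', 'h', 'o'] := by decide
  have s5 : PySem.List.slice ['b', 'r', 'o', 'w', '_', 'l', 'i', 'f', 't'] none (some 5) = ['b', 'r', 'o', 'w', '_'] := by decide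
  have s6 : PySem.List.slice ['m', 'e', 'n', 't', 'o', 'p', 'l', 'a', 's', 't', 'y'] none (some 5) = ['m', 'e', 'n', 't', 'o'] := by decide
  by_cases h1 : PySem.Chars.isIn ['r', 'h', 'i', 'n', 'o'] (PySem.Chars.lower prefix_.toList) = true
  · cases hf : PySem.Chars.isIn ['r', 'h', 'i', 'n', 'o', 'p', 'l', 'a', 's', 't', 'y'] (PySem.Chars.lower prefix_.toList) <;>
      simp [pvALoop, List.find?, s1, s2, s3, s4, s5, s6, h1, hf]
  · replace h1 := Bool.eq_false_iff.mpr h1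
    have f1 : PySem.Chars.isIn ['r', 'h', 'i', 'n', 'o', 'p', 'l', 'a', 's', 't', 'y'] (PySem.Chars.lower prefix_.toList) = false := pv_isIn_false_of_prefix (by decide) h1
    by_cases h2 : PySem.Chars.isIn ['b', 'l', 'e', 'p', 'h'] (PySem.Chars.lower prefix_.toList) = true
    · cases hf : PySem.Chars.isIn ['b', 'l', 'e', 'p', 'h', 'a', 'r', 'o', 'p', 'l', 'a', 's', 't', 'y'] (PySem.Chars.lower prefix_.toList) <;>
        simp [pvALoop, List.find?, s1, s2, s3, s4, s5, s6, h1, f1, h2, hf]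
    · replace h2 := Bool.eq_false_iff.mpr h2
      have f2 : PySem.Chars.isIn ['b', 'l', 'e', 'p', 'h', 'a', 'r', 'o', 'p', 'l', 'a', 's', 't', 'y'] (PySem.Chars.lower prefix_.toList) = false := pv_isIn_false_of_prefix (by decide) h2
      by_cases h3 : PySem.Chars.isIn ['r', 'h', 'y', 't', 'i'] (PySem.Chars.lower prefix_.toList) = true
      · cases hf : PySem.Chars.isIn ['r', 'h', 'y', 't', 'i', 'd', 'e', 'c', 't', 'o', 'm', 'y'] (PySem.Chars.lower prefix_.toList) <;>
          simp [pvALoop, List.find?, s1, s2, s3, s4, s5, s6, h1, f1, h2, f2, h3, hf]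
      · replace h3 := Bool.eq_false_iff.mpr h3
        have f3 : PySem.Chars.isIn ['r', 'h', 'y', 't', 'i', 'd', 'e', 'c', 't', 'o', 'm', 'y'] (PySem.Chars.lower prefix_.toList) = false := pv_isIn_false_of_prefix (by decide) h3
        have f3' : PySem.Chars.isIn ['r', 'h', 'y', 't', 'i', 'd'] (PySem.Chars.lower prefix_.toList) = false := pv_isIn_false_of_prefix (by decide) h3
        by_cases h4 : PySem.Chars.isIn ['o', 'r', 't', 'h', 'o'] (PySem.Chars.lower prefix_.toList) = true
        · cases hf : PySem.Chars.isIn ['o', 'r', 't', 'h', 'o', 'g', 'n', 'a', 't', 'h', 'i', 'c'] (PySem.Chars.lower prefix_.toList) <;>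
            simp [pvALoop, List.find?, s1, s2, s3, s4, s5, s6, h1, f1, h2, f2, h3, f3, f3', h4, hf]
        · replace h4 := Bool.eq_false_iff.mpr h4
          have f4 : PySem.Chars.isIn ['o', 'r', 't', 'h', 'o', 'g', 'n', 'a', 't', 'h', 'i', 'c'] (PySem.Chars.lower prefix_.toList) = false := pv_isIn_false_of_prefix (by decide) h4
          by_cases h5 : PySem.Chars.isIn ['b', 'r', 'o', 'w', '_'] (PySem.Chars.lower prefix_.toList) = true
          · cases hf : PySem.Chars.isIn ['b', 'r', 'o', 'w', '_', 'l', 'i', 'f', 't'] (PySem.Chars.lower prefix_.toList) <;>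
              simp [pvALoop, List.find?, s1, s2, s3, s4, s5, s6, h1, f1, h2, f2, h3, f3, f3', h4, f4, h5, hf]
          · replace h5 := Bool.eq_false_iff.mpr h5
            have f5 : PySem.Chars.isIn ['b', 'r', 'o', 'w', '_', 'l', 'i', 'f', 't'] (PySem.Chars.lower prefix_.toList) = false := pv_isIn_false_of_prefix (by decide) h5
            by_cases h6 : PySem.Chars.isIn ['m', 'e', 'n', 't', 'o'] (PySem.Chars.lower prefix_.toList) = true
            · cases hf : PySem.Chars.isIn ['m', 'e', 'n', 't', 'o', 'p', 'l', 'a', 's', 't', 'y'] (PySem.Chars.lower prefix_.toList) <;>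
                simp [pvALoop, List.find?, s1, s2, s3, s4, s5, s6, h1, f1, h2, f2, h3, f3, f3', h4, f4, h5, f5, h6, hf]
            · replace h6 := Bool.eq_false_iff.mpr h6
              have f6 : PySem.Chars.isIn ['m', 'e', 'n', 't', 'o', 'p', 'l', 'a', 's', 't', 'y'] (PySem.Chars.lower prefix_.toList) = false := pv_isIn_false_of_prefix (by decide) h6
              cases hn : PySem.Chars.isIn ['n', 'o', 's', 'e'] (PySem.Chars.lower prefix_.toList) <;>
                cases he : PySem.Chars.isIn ['e', 'y', 'e'] (PySem.Chars.lower prefix_.toList) <;>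
                cases hfa : PySem.Chars.isIn ['f', 'a', 'c', 'e'] (PySem.Chars.lower prefix_.toList) <;>
                cases hl : PySem.Chars.isIn ['l', 'i', 'f', 't'] (PySem.Chars.lower prefix_.toList) <;>
                cases hj : PySem.Chars.isIn ['j', 'a', 'w'] (PySem.Chars.lower prefix_.toList) <;>
                simp [pvALoop, List.find?, s1, s2, s3, s4, s5, s6, h1, f1, h2, f2, h3, f3, f3', h4, f4, h5, f5, h6, f6, hn, he, hfa, hl, hj]

-- ===== VERDICT (by name: the statement is the Claim_ definition above) =====
theorem infer_procedure_spec : Claim_equal_infer_procedure := by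
  intro p _
  unfold Spec_infer_procedure
  exact infer_procedure_eq_alt p
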